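-- pv_equiv track=rewrite | github.com/ecassmage/Python | Advent of Code/Advent of Code 2020/Day 17/Part 2.py | size_of_cube
-- ===== SOURCE A (Python) =====
-- def size_of_cube(coord_size):
--     l_x, l_y, l_z, l_w, cube_bound = 0, 0, 0, 0, []
--     for x1, y1, z1, w1 in coord_size:
--         if x1 > l_x:
--             l_x = x1
--         if y1 > l_y:
--             l_y = y1
--         if z1 > l_z:
--             l_z = z1
--         if w1 > l_w:
--             l_w = w1
--     cube_bound.append(l_x + 2), cube_bound.append(l_y + 2), cube_bound.append(l_z + 2), cube_bound.append(l_w + 2)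
--     for x1, y1, z1, w1 in coord_size:
--         if x1 < l_x:
--             l_x = x1
--         if y1 < l_y:
--             l_y = y1
--         if z1 < l_z:
--             l_z = z1
--         if w1 < l_w:
--             l_w = w1
--     cube_bound.append(l_x - 1), cube_bound.append(l_y - 1), cube_bound.append(l_z - 1), cube_bound.append(l_w - 1)
--     return cube_bound
-- ===== SOURCE B (Python) =====
-- def size_of_cube(coord_size):
--     xs = [x for x, y, z, w in coord_size]
--     ys = [y for x, y, z, w in coord_size]
--     zs = [z for x, y, z, w in coord_size]
--     ws = [w for x, y, z, w in coord_size]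
--     cols = (xs, ys, zs, ws)
--     upper = [max([0] + col) + 2 for col in cols]
--     lower = [min(col, default=0) - 1 for col in cols]
--     return upper + lower
-- ===== Notes on version B (the rewrite author's own statement) =====
-- stated objective: simpler
-- what changed: Replaces A's two interleaved passes over four shared running accumulators with a column-oriented build-then-reduce: extract the four coordinate columns once, then compute each bound with built-in max([0]+col)+2 and min(col, default=0)-1.
import Mathlib
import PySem

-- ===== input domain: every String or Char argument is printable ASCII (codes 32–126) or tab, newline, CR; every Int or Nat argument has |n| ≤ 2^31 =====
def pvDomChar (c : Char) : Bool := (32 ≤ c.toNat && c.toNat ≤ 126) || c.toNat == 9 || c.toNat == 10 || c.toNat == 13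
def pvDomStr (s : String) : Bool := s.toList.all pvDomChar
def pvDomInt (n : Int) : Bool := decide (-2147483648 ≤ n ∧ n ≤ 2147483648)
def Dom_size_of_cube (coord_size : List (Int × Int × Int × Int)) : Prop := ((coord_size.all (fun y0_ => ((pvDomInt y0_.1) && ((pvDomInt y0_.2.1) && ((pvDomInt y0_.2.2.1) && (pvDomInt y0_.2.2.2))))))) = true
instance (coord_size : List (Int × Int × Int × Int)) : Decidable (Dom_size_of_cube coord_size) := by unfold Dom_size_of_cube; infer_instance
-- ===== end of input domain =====

-- B builds the four coordinate columns once and reduces each with built-in max/min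
-- (column-oriented build-then-reduce) instead of A's two interleaved passes over
-- shared running accumulators; objective: simpler.

-- ===== PORT A =====
-- first for-loop of A: running max per component, initial accumulators threaded in
def pvPassMax : List (Int × Int × Int × Int) → Int → Int → Int → Int → Int × Int × Int × Int
  | [], a, b, c, d => (a, b, c, d)
  | (x1, y1, z1, w1) :: t, a, b, c, d =>
      pvPassMax t (if x1 > a then x1 else a) (if y1 > b then y1 else b)
        (if z1 > c then z1 else c) (if w1 > d then w1 else d)

-- second for-loop of A: running min per component, starting from the max-pass state
def pvPassMin : List (Int × Int × Int × Int) → Int → Int → Int → Int → Int × Int × Int × Int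
  | [], a, b, c, d => (a, b, c, d)
  | (x1, y1, z1, w1) :: t, a, b, c, d =>
      pvPassMin t (if x1 < a then x1 else a) (if y1 < b then y1 else b)
        (if z1 < c then z1 else c) (if w1 < d then w1 else d)

def size_of_cube (coord_size : List (Int × Int × Int × Int)) : List Int :=
  let s1 := pvPassMax coord_size 0 0 0 0
  let s2 := pvPassMin coord_size s1.1 s1.2.1 s1.2.2.1 s1.2.2.2
  [s1.1 + 2, s1.2.1 + 2, s1.2.2.1 + 2, s1.2.2.2 + 2,
   s2.1 - 1, s2.2.1 - 1, s2.2.2.1 - 1, s2.2.2.2 - 1]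

-- ===== PORT B =====
-- max([0] + col) + 2
def pvUpper (col : List Int) : Int := ((PySem.List.max? ((0 : Int) :: col) (fun y => y)).getD 0) + 2
-- min(col, default=0) - 1
def pvLower (col : List Int) : Int := ((PySem.List.min? col (fun y => y)).getD 0) - 1

def size_of_cube_alt (coord_size : List (Int × Int × Int × Int)) : List Int :=
  let xs := coord_size.map (fun p => p.1)
  let ys := coord_size.map (fun p => p.2.1)
  let zs := coord_size.map (fun p => p.2.2.1)
  let ws := coord_size.map (fun p => p.2.2.2)
  ([xs, ys, zs, ws].map pvUpper) ++ ([xs, ys, zs, ws].map pvLower)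

-- ===== PRECONDITION & SPEC =====
def Spec_size_of_cube (coord_size : List (Int × Int × Int × Int)) (out : List Int) : Prop := out = size_of_cube_alt coord_size
instance (coord_size : List (Int × Int × Int × Int)) (out : List Int) : Decidable (Spec_size_of_cube coord_size out) := by unfold Spec_size_of_cube; infer_instance

-- ===== CLAIM (what is proved, stated in full; the proofs are below) =====
def Claim_equal_size_of_cube : Prop := ∀ (coord_size : List (Int × Int × Int × Int)), Dom_size_of_cube coord_size → Spec_size_of_cube coord_size (size_of_cube coord_size)

-- ===== LEMMAS AND PROOFS =====

theorem pvPassMax_eq (cs : List (Int × Int × Int × Int)) (a b c d : Int) :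
    pvPassMax cs a b c d =
      ((cs.map (fun p => p.1)).foldl max a,
       (cs.map (fun p => p.2.1)).foldl max b,
       (cs.map (fun p => p.2.2.1)).foldl max c,
       (cs.map (fun p => p.2.2.2)).foldl max d) := by
  induction cs generalizing a b c d with
  | nil => rfl
  | cons h t ih =>
      obtain ⟨x, y, z, w⟩ := h
      simp only [pvPassMax, List.map, List.foldl, ih]
      congr 1 <;> [skip; congr 1] <;> [skip; skip; congr 1] <;>
        · congr 1; split <;> omega

theorem pvPassMin_eq (cs : List (Int × Int × Int × Int)) (a b c d : Int) :
    pvPassMin cs a b c d =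
      ((cs.map (fun p => p.1)).foldl min a,
       (cs.map (fun p => p.2.1)).foldl min b,
       (cs.map (fun p => p.2.2.1)).foldl min c,
       (cs.map (fun p => p.2.2.2)).foldl min d) := by
  induction cs generalizing a b c d with
  | nil => rfl
  | cons h t ih =>
      obtain ⟨x, y, z, w⟩ := h
      simp only [pvPassMin, List.map, List.foldl, ih]
      congr 1 <;> [skip; congr 1] <;> [skip; skip; congr 1] <;>
        · congr 1; split <;> omega

theorem pvUpper_eq (col : List Int) : pvUpper col = col.foldl max 0 + 2 := by
  simp [pvUpper, PySem.List.max?_id_cons]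

theorem pvLower_eq (col : List Int) :
    pvLower col = (col.foldl min (col.foldl max 0)) - 1 := by
  cases col with
  | nil => rfl
  | cons h t =>
      simp only [pvLower, PySem.List.min?_id_cons, Option.getD_some, List.foldl]
      have hle : h ≤ max 0 h := le_max_right 0 h
      have hM := (PySem.List.le_foldl_max t (max 0 h)).1
      have : min (t.foldl max (max 0 h)) h = h := min_eq_right (le_trans hle hM)
      rw [this]

theorem size_of_cube_spec' (cs : List (Int × Int × Int × Int)) :
    size_of_cube cs = size_of_cube_alt cs := by
  simp only [size_of_cube, size_of_cube_alt, pvPassMax_eq, pvPassMin_eq,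
    List.map, List.cons_append, List.nil_append, pvUpper_eq, pvLower_eq]

-- ===== VERDICT (by name: the statement is the Claim_ definition above) =====
theorem size_of_cube_spec : Claim_equal_size_of_cube := by
  intro cs _
  unfold Spec_size_of_cube
  exact size_of_cube_spec' cs
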